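-- pv_equiv track=rewrite | github.com/meghabyte/pencilcode-public | src/data/hf_data.py | create_synthetic_trace
-- ===== SOURCE A (Python) =====
-- def create_synthetic_trace(last_program, target_len):
--         split_program = last_program.split("|")
--         build_program = []
--         for i in range(1, len(split_program)-1):
--             build_program.append("|".join(split_program[0:i])+"|")
--         if(target_len < len(split_program)):
--             return build_program[-target_len:]
--         else:
--             return build_program
-- ===== SOURCE B (Python) =====
-- def create_synthetic_trace(last_program, target_len):
--     parts = last_program.split("|")
--     acc = ""
--     build = []
--     for p in parts[:-2]:
--         acc = acc + p + "|"
--         build.append(acc)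
--     if target_len < len(parts):
--         return build[-target_len:]
--     return build
-- ===== Notes on version B (the rewrite author's own statement) =====
-- stated objective: alternative
-- what changed: Replaces the per-iteration '|'.join over a growing slice with a single left-to-right pass over parts[:-2] maintaining one running prefix string (accumulator), eliminating the repeated join/slice work.
import Mathlib
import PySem

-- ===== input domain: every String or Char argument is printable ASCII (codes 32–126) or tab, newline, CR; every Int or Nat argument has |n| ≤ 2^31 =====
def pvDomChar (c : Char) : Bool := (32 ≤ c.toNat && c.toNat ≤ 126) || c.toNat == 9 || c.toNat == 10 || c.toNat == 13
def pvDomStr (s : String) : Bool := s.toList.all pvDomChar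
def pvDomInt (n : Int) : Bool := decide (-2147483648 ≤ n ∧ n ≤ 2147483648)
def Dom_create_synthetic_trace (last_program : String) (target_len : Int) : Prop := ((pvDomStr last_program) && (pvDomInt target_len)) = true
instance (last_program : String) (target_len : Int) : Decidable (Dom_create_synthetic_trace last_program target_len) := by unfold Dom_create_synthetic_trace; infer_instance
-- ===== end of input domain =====

-- B replaces A's per-iteration '|'.join over a growing slice by one pass with a running
-- accumulator string (alternative decomposition); return values are proved identical.

-- ===== PORT A =====
def create_synthetic_trace (last_program : String) (target_len : Int) : List String :=
  -- last_program.split("|"): sep "|" ≠ "" so Str.split? is always `some`; getD is exact here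
  let split_program := (PySem.Str.split? last_program "|").getD []
  let build_program := (PySem.List.pyRange 1 ((split_program.length : Int) - 1) 1).foldl
      (fun acc i => acc ++ [PySem.Str.join "|" (PySem.List.slice split_program (some 0) (some i)) ++ "|"]) []
  if target_len < (split_program.length : Int) then
    PySem.List.slice build_program (some (-target_len)) none
  else build_program

-- ===== PORT B =====
def create_synthetic_trace_alt (last_program : String) (target_len : Int) : List String :=
  -- last_program.split("|"): sep "|" ≠ "" so Str.split? is always `some`; getD is exact here
  let parts := (PySem.Str.split? last_program "|").getD []
  let st := (PySem.List.slice parts none (some (-2))).foldl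
      (fun (st : String × List String) p =>
        let acc := st.1 ++ p ++ "|"
        (acc, st.2 ++ [acc])) ("", [])
  if target_len < (parts.length : Int) then
    PySem.List.slice st.2 (some (-target_len)) none
  else st.2

-- ===== PRECONDITION & SPEC =====
def Spec_create_synthetic_trace (last_program : String) (target_len : Int) (out : List String) : Prop := out = create_synthetic_trace_alt last_program target_len
instance (last_program : String) (target_len : Int) (out : List String) : Decidable (Spec_create_synthetic_trace last_program target_len out) := by unfold Spec_create_synthetic_trace; infer_instance

-- ===== CLAIM (what is proved, stated in full; the proofs are below) =====
def Claim_equal_create_synthetic_trace : Prop := ∀ (last_program : String) (target_len : Int), Dom_create_synthetic_trace last_program target_len → Spec_create_synthetic_trace last_program target_len (create_synthetic_trace last_program target_len)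

-- ===== LEMMAS AND PROOFS =====

-- concatenation of p ++ "|" over a list of strings: the value B's accumulator holds
def catBar : List String → String
  | [] => ""
  | p :: ps => (p ++ "|") ++ catBar ps

theorem toList_catBar (ys : List String) :
    (catBar ys).toList = (ys.map (fun p => p.toList ++ ['|'])).flatten := by
  induction ys with
  | nil => simp [catBar]
  | cons p ps ih => simp [catBar, String.toList_append, ih]

-- A's element "|".join(ys) + "|" is exactly catBar ys for nonempty ys
theorem join_bar_eq_catBar (ys : List String) (h : ys ≠ []) :
    PySem.Str.join "|" ys ++ "|" = catBar ys := by
  rw [← String.toList_inj]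
  induction ys with
  | nil => exact absurd rfl h
  | cons p ps ih =>
    cases ps with
    | nil =>
      simp [String.toList_append, PySem.Str.toList_join, PySem.Chars.join_singleton,
        toList_catBar]
    | cons q rest =>
      have htl := ih (by simp)
      simp only [String.toList_append, PySem.Str.toList_join, List.map_cons,
        PySem.Chars.join_cons_cons, toList_catBar] at htl ⊢
      have hpipe : "|".toList = ['|'] := rfl
      rw [hpipe] at htl ⊢
      simp only [List.append_assoc, List.flatten_cons] at htl ⊢
      rw [htl]

-- B's fold invariant: the accumulator is (initial ++ catBar consumed), the output collects
-- one entry per consumed element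
theorem bfold (xs : List String) (a : String) (out : List String) :
    xs.foldl (fun (st : String × List String) p =>
        ((st.1 ++ p ++ "|"), st.2 ++ [st.1 ++ p ++ "|"])) (a, out)
      = (a ++ catBar xs,
         out ++ (List.range xs.length).map (fun j => a ++ catBar (xs.take (j + 1)))) := by
  induction xs generalizing a out with
  | nil => simp [catBar]
  | cons p ps ih =>
    simp only [List.foldl_cons, ih, List.length_cons, List.range_succ_eq_map, List.map_cons,
      List.map_map, Prod.mk.injEq]
    refine ⟨?_, ?_⟩
    · rw [← String.toList_inj]
      simp [catBar, String.toList_append]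
    · simp only [List.take_succ_cons, List.append_assoc, List.singleton_append]
      congr 1
      simp only [List.cons.injEq]
      refine ⟨?_, ?_⟩
      · rw [← String.toList_inj]; simp [catBar, String.toList_append]
      · apply List.map_congr_left
        intro j _
        rw [← String.toList_inj]
        simp [Function.comp, catBar, String.toList_append]

-- the two build lists coincide for every split result
theorem builds_eq (sp : List String) :
    (PySem.List.pyRange 1 ((sp.length : Int) - 1) 1).foldl
        (fun acc i => acc ++ [PySem.Str.join "|" (PySem.List.slice sp (some 0) (some i)) ++ "|"]) []
      = ((PySem.List.slice sp none (some (-2))).foldl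
          (fun (st : String × List String) p =>
            ((st.1 ++ p ++ "|"), st.2 ++ [st.1 ++ p ++ "|"])) ("", [])).2 := by
  rw [PySem.List.foldl_append_singleton_eq_map, PySem.List.pyRange_one,
    PySem.List.slice_to_neg_ofNat sp 2 (by omega), bfold]
  have hlen : ((sp.length : Int) - 1 - 1).toNat = sp.length - 2 := by omega
  rw [hlen, List.map_map, List.nil_append, List.nil_append,
    List.length_take, Nat.min_eq_left (Nat.sub_le _ _)]
  apply List.map_congr_left
  intro j hj
  have hj' : j < sp.length - 2 := List.mem_range.mp hj
  have htake : (sp.take (sp.length - 2)).take (j + 1) = sp.take (j + 1) := by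
    rw [List.take_take, Nat.min_eq_left (by omega)]
  have hne : sp.take (j + 1) ≠ [] := by
    have : (sp.take (j + 1)).length = j + 1 := by
      rw [List.length_take]; omega
    intro hcon; rw [hcon] at this; simp at this
  have hslice : PySem.List.slice sp (some 0) (some (1 + (j : Int))) = sp.take (j + 1) := by
    rw [PySem.List.slice_zero_start,
      PySem.List.slice_to (xs := sp) (b := 1 + (j : Int)) (by omega)]
    congr 1; omega
  simp only [Function.comp, hslice, htake]
  rw [join_bar_eq_catBar _ hne]
  rw [← String.toList_inj]
  simp

-- ===== VERDICT (by name: the statement is the Claim_ definition above) =====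
theorem create_synthetic_trace_spec : Claim_equal_create_synthetic_trace := by
  intro last_program target_len _
  unfold Spec_create_synthetic_trace
  simp only [create_synthetic_trace, create_synthetic_trace_alt]
  rw [builds_eq]
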